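-- pv_equiv track=rewrite | github.com/Arsen1302/Code-copy-detector | TestData/solutions/problem_733_3.py | solution_733_3
-- ===== SOURCE A (Python) =====
-- from typing import List
--
-- def solution_733_3(matrix: List[List[int]]) -> int:
--     m, n = len(matrix), len(matrix[0]) # dimensions
--     score = [0]*m
--
--     for j in range(1, n):
--         for i in range(m):
--             score[i] *= 2
--             if matrix[i][0] != matrix[i][j]: score[i] += 1
--
--     freq = {}
--     for x in score: freq[x] = 1 + freq.get(x, 0)
--     return max(freq.values())
-- ===== SOURCE B (Python) =====
-- from typing import List
--
-- def solution_733_3(matrix: List[List[int]]) -> int: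
--     n = len(matrix[0])
--     best = 0
--     for r in matrix:
--         c = 0
--         for s in matrix:
--             if all((r[j] != r[0]) == (s[j] != s[0]) for j in range(1, n)):
--                 c += 1
--         if c > best:
--             best = c
--     return best
-- ===== Notes on version B (the rewrite author's own statement) =====
-- stated objective: alternative
-- what changed: B drops A's per-row integer key-packing and frequency dict entirely: it compares rows pairwise (nested loops over rows testing column-by-column whether two rows flip-match) and keeps a running maximum of the per-row match count, trading A's O(m*n) canonicalize-and-count for a keyless O(m^2*n) pairwise scan.
import Mathlib
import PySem

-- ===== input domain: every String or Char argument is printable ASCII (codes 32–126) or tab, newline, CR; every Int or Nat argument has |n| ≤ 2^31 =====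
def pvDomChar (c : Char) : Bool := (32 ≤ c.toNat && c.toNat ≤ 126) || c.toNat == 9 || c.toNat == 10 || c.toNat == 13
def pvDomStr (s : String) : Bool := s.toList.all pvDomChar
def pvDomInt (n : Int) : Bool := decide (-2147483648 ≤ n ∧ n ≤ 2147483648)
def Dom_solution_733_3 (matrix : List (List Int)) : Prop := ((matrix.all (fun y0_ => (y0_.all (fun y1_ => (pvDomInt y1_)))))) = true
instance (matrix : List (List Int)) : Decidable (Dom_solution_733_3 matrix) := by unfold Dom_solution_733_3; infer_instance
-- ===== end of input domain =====

-- B replaces A's column-major bit-packing into per-row integer keys counted by a dict with a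
-- keyless pairwise scan: for each row it counts the rows that flip-match it column by column
-- and keeps a running maximum (alternative algorithm, no keys and no dict; O(m^2*n) vs O(m*n)).

-- ===== PORT A =====
def solution_733_3 (matrix : List (List Int)) : Int :=
  let m := matrix.length
  let n := ((PySem.List.pyGet? matrix 0).getD []).length
  let score : List Int := List.replicate m 0
  let score := (PySem.List.pyRange 1 (n : Int) 1).foldl (fun score j =>
    (PySem.List.pyRange 0 (m : Int) 1).foldl (fun s i =>
      let s := PySem.List.pySetD s i (2 * PySem.List.pyGetD s i 0)
      if PySem.List.pyGetD (PySem.List.pyGetD matrix i []) 0 0 ≠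
         PySem.List.pyGetD (PySem.List.pyGetD matrix i []) j 0
      then PySem.List.pySetD s i (PySem.List.pyGetD s i 0 + 1)
      else s) score) score
  let freq := score.foldl (fun d x => d.insert x (1 + d.getD x 0)) PySem.Dict.empty
  (PySem.List.max? freq.values (fun v => v)).getD 0

-- ===== PORT B =====
def solution_733_3_alt (matrix : List (List Int)) : Int :=
  let n := ((PySem.List.pyGet? matrix 0).getD []).length
  matrix.foldl (fun best r =>
    let c := matrix.foldl (fun c s =>
      if (PySem.List.pyRange 1 (n : Int) 1).all (fun j =>
           decide (PySem.List.pyGetD r j 0 ≠ PySem.List.pyGetD r 0 0) ==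
           decide (PySem.List.pyGetD s j 0 ≠ PySem.List.pyGetD s 0 0))
      then c + 1 else c) (0 : Int)
    if c > best then c else best) 0

-- ===== PRECONDITION & SPEC =====
-- Pre_ excludes exactly the inputs where Python A raises IndexError: the empty matrix
-- (matrix[0]), and, when the first row has at least 2 entries (so columns 0 and j are
-- actually read), matrices with a row shorter than the first row (matrix[i][j]).
def Pre_solution_733_3 (matrix : List (List Int)) : Prop :=
  matrix ≠ [] ∧ (2 ≤ (matrix.headD []).length →
    ∀ r ∈ matrix, (matrix.headD []).length ≤ r.length)
instance (matrix : List (List Int)) : Decidable (Pre_solution_733_3 matrix) := by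
  unfold Pre_solution_733_3; infer_instance

def pvWitness_solution_733_3 : List (List Int) := [[1, 0], [0, 1], [1, 1]]

def Spec_solution_733_3 (matrix : List (List Int)) (out : Int) : Prop := out = solution_733_3_alt matrix
instance (matrix : List (List Int)) (out : Int) : Decidable (Spec_solution_733_3 matrix out) := by unfold Spec_solution_733_3; infer_instance

-- ===== CLAIM (what is proved, stated in full; the proofs are below) =====
def Claim_equal_solution_733_3 : Prop := ∀ (matrix : List (List Int)), Dom_solution_733_3 matrix → Pre_solution_733_3 matrix → Spec_solution_733_3 matrix (solution_733_3 matrix)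

-- ===== LEMMAS AND PROOFS =====

-- the 0/1 column contribution of row r at column j, as A computes it
def pvBit (r : List Int) (j : Int) : Int :=
  if PySem.List.pyGetD r 0 0 ≠ PySem.List.pyGetD r j 0 then 1 else 0

-- the canonical boolean flip-pattern of row r (the fact both programs group rows by)
def pvKey (n : ℕ) (r : List Int) : List Bool :=
  (PySem.List.pyRange 1 (n : Int) 1).map (fun j =>
    decide (PySem.List.pyGetD r j 0 ≠ PySem.List.pyGetD r 0 0))

-- MSB-first binary value of a boolean key (A's packed per-row score)
def pvEnc (bs : List Bool) : Int :=
  bs.foldl (fun a b => 2 * a + (if b then 1 else 0)) 0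
theorem pv_getD_append (pre l : List Int) (x d : Int) :
    (pre ++ x :: l).getD pre.length d = x := by
  induction pre with
  | nil => rfl
  | cons p pre _ih => simp

theorem pv_set_append (pre l : List Int) (v : Int) :
    (pre ++ l).set pre.length v = pre ++ l.set 0 v := by
  induction pre with
  | nil => rfl
  | cons p pre ih => simp [ih]

theorem pv_inner_spec (matrix : List (List Int)) (j : Int) (g : List Int → Int) :
    ∀ (suf : List (List Int)) (k : ℕ), matrix.drop k = suf →
    (PySem.List.pyRange (k : Int) (matrix.length : Int) 1).foldl (fun s i =>
        let s := PySem.List.pySetD s i (2 * PySem.List.pyGetD s i 0)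
        if PySem.List.pyGetD (PySem.List.pyGetD matrix i []) 0 0 ≠
           PySem.List.pyGetD (PySem.List.pyGetD matrix i []) j 0
        then PySem.List.pySetD s i (PySem.List.pyGetD s i 0 + 1)
        else s)
      ((matrix.take k).map (fun r => 2 * g r + pvBit r j) ++ suf.map g)
    = matrix.map (fun r => 2 * g r + pvBit r j) := by
  intro suf
  induction suf with
  | nil =>
    intro k hdrop
    have hk : matrix.length ≤ k := List.drop_eq_nil_iff.mp hdrop
    rw [PySem.List.pyRange_one_eq_nil (by exact_mod_cast hk)]
    simp [List.take_of_length_le hk]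
  | cons r suf ih =>
    intro k hdrop
    have hget : matrix[k]? = some r := by
      have h0 : (matrix.drop k)[0]? = some r := by rw [hdrop]; rfl
      simpa using h0
    have hk : k < matrix.length := (List.getElem?_eq_some_iff.mp hget).1
    have htk : (matrix.take k).length = k := List.length_take_of_le (le_of_lt hk)
    rw [PySem.List.pyRange_one_cons (by exact_mod_cast hk)]
    rw [List.foldl_cons]
    set pre := (matrix.take k).map (fun r => 2 * g r + pvBit r j) with hpre
    have hprelen : pre.length = k := by rw [hpre, List.length_map, htk]
    have hrow : PySem.List.pyGetD matrix ((k : ℕ) : Int) [] = r := by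
      simp [PySem.List.pyGetD_natCast, List.getD, hget]
    have hread1 : PySem.List.pyGetD (pre ++ (r :: suf).map g) ((k : ℕ) : Int) 0 = g r := by
      simp only [PySem.List.pyGetD_natCast, List.map_cons]
      rw [← hprelen]; exact pv_getD_append pre _ (g r) 0
    have hset1 : PySem.List.pySetD (pre ++ (r :: suf).map g) ((k : ℕ) : Int) (2 * g r)
        = pre ++ (2 * g r) :: suf.map g := by
      simp only [PySem.List.pySetD_natCast, List.map_cons]
      rw [← hprelen, pv_set_append]; rfl
    have hread2 : PySem.List.pyGetD (pre ++ (2 * g r) :: suf.map g) ((k : ℕ) : Int) 0 = 2 * g r := by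
      simp only [PySem.List.pyGetD_natCast]
      rw [← hprelen]; exact pv_getD_append pre _ _ 0
    have hset2 : PySem.List.pySetD (pre ++ (2 * g r) :: suf.map g) ((k : ℕ) : Int) (2 * g r + 1)
        = pre ++ (2 * g r + 1) :: suf.map g := by
      simp only [PySem.List.pySetD_natCast]
      rw [← hprelen, pv_set_append]; rfl
    have hdrop' : matrix.drop (k + 1) = suf := by
      rw [← List.drop_drop, hdrop]
      rfl
    have hcast : ((k : ℕ) : Int) + 1 = (((k + 1 : ℕ)) : Int) := by push_cast; ring
    have htail : List.foldl (fun s i =>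
        let s := PySem.List.pySetD s i (2 * PySem.List.pyGetD s i 0)
        if PySem.List.pyGetD (PySem.List.pyGetD matrix i []) 0 0 ≠
           PySem.List.pyGetD (PySem.List.pyGetD matrix i []) j 0
        then PySem.List.pySetD s i (PySem.List.pyGetD s i 0 + 1)
        else s)
        ((matrix.take (k + 1)).map (fun r => 2 * g r + pvBit r j) ++ suf.map g)
        (PySem.List.pyRange (((k : ℕ) : Int) + 1) (matrix.length : Int))
        = matrix.map (fun r => 2 * g r + pvBit r j) := by
      rw [hcast]; exact ih (k + 1) hdrop'
    have hstep : (matrix.take (k + 1)).map (fun r => 2 * g r + pvBit r j) ++ suf.map g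
        = pre ++ (2 * g r + pvBit r j) :: suf.map g := by
      rw [List.take_add_one, List.map_append, hget]
      simp [hpre]
    rw [hstep] at htail
    simp only [hread1, hset1, hrow, hread2, hset2]
    by_cases h : PySem.List.pyGetD r 0 0 ≠ PySem.List.pyGetD r j 0
    · simp only [if_pos h]
      have h2 : (2 : Int) * g r + 1 = 2 * g r + pvBit r j := by simp [pvBit, h]
      rw [h2]; exact htail
    · simp only [if_neg h]
      have h2 : (2 : Int) * g r = 2 * g r + pvBit r j := by simp [pvBit, h]
      rw [h2]; exact htail

theorem pv_outer_spec (matrix : List (List Int)) :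
    ∀ (js : List Int) (g : List Int → Int),
    js.foldl (fun score j =>
      (PySem.List.pyRange 0 (matrix.length : Int) 1).foldl (fun s i =>
        let s := PySem.List.pySetD s i (2 * PySem.List.pyGetD s i 0)
        if PySem.List.pyGetD (PySem.List.pyGetD matrix i []) 0 0 ≠
           PySem.List.pyGetD (PySem.List.pyGetD matrix i []) j 0
        then PySem.List.pySetD s i (PySem.List.pyGetD s i 0 + 1)
        else s) score) (matrix.map g)
    = matrix.map (fun r => js.foldl (fun a j => 2 * a + pvBit r j) (g r)) := by
  intro js
  induction js with
  | nil => intro g; simp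
  | cons j js ih =>
    intro g
    rw [List.foldl_cons]
    have hinner := pv_inner_spec matrix j g matrix 0 rfl
    simp only [List.take_zero, List.map_nil, List.nil_append, Nat.cast_zero] at hinner
    rw [hinner, ih (fun r => 2 * g r + pvBit r j)]
    simp
theorem pvEnc_aux (bs : List Bool) : ∀ (a : Int),
    bs.foldl (fun a b => 2 * a + (if b then 1 else 0)) a = a * 2 ^ bs.length + pvEnc bs := by
  induction bs with
  | nil => intro a; simp [pvEnc]
  | cons b bs ih =>
    intro a
    simp only [List.foldl_cons, List.length_cons, pvEnc]
    rw [ih, ih (2 * 0 + (if b then 1 else 0))]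
    ring

theorem pvEnc_bounds (bs : List Bool) : 0 ≤ pvEnc bs ∧ pvEnc bs < 2 ^ bs.length := by
  induction bs with
  | nil => simp [pvEnc]
  | cons b bs ih =>
    have h : pvEnc (b :: bs) = (if b then 1 else 0) * 2 ^ bs.length + pvEnc bs := by
      simp only [pvEnc, List.foldl_cons]
      rw [pvEnc_aux]; norm_num [pvEnc]
    have hp : (0:Int) < 2 ^ bs.length := by positivity
    constructor
    · rw [h]; cases b <;> simp <;> omega
    · rw [h]; simp only [List.length_cons, pow_succ]
      cases b <;> simp <;> omega

theorem pvEnc_inj : ∀ (bs cs : List Bool), bs.length = cs.length → pvEnc bs = pvEnc cs → bs = cs := by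
  intro bs
  induction bs with
  | nil => intro cs h _; exact (List.eq_nil_of_length_eq_zero h.symm).symm ▸ rfl
  | cons b bs ih =>
    intro cs hlen henc
    cases cs with
    | nil => simp at hlen
    | cons c cs =>
      simp only [List.length_cons, Nat.add_right_cancel_iff] at hlen
      have hb : pvEnc (b :: bs) = (if b then 1 else 0) * 2 ^ bs.length + pvEnc bs := by
        simp only [pvEnc, List.foldl_cons]; rw [pvEnc_aux]; norm_num [pvEnc]
      have hc : pvEnc (c :: cs) = (if c then 1 else 0) * 2 ^ cs.length + pvEnc cs := by
        simp only [pvEnc, List.foldl_cons]; rw [pvEnc_aux]; norm_num [pvEnc]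
      have h1 := pvEnc_bounds bs
      have h2 := pvEnc_bounds cs
      rw [hb, hc, ← hlen] at henc
      rw [← hlen] at h2
      have hbc : b = c := by
        by_contra hne
        have hp : (0:Int) < 2 ^ bs.length := by positivity
        cases b <;> cases c <;> simp_all <;> omega
      subst hbc
      have : pvEnc bs = pvEnc cs := by
        have hp : (0:Int) < 2 ^ bs.length := by positivity
        cases b <;> simp at henc <;> omega
      rw [ih cs hlen this]
theorem pv_count_map_injOn {α β : Type} [BEq α] [LawfulBEq α] [BEq β] [LawfulBEq β] (g : α → β)
    (xs : List α) (hg : ∀ x ∈ xs, ∀ y ∈ xs, g x = g y → x = y) (k : α) (hk : k ∈ xs) :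
    (xs.map g).count (g k) = xs.count k := by
  rw [List.count_eq_countP, List.count_eq_countP, List.countP_map]
  refine List.countP_congr ?_
  intro x hx
  simp only [Function.comp_apply, beq_iff_eq]
  constructor
  · intro h; exact hg x hx k hk h
  · intro h; rw [h]

theorem pv_ofList_map_injOn {α β : Type} [BEq α] [LawfulBEq α] [BEq β] [LawfulBEq β] (g : α → β) :
    ∀ (xs : List α), (∀ x ∈ xs, ∀ y ∈ xs, g x = g y → x = y) →
    PySem.Set.ofList (xs.map g) = (PySem.Set.ofList xs).map g := by
  intro xs
  induction xs using List.reverseRecOn with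
  | nil => intro _; rfl
  | append_singleton ys x ih =>
    intro hg
    have hg' : ∀ a ∈ ys, ∀ b ∈ ys, g a = g b → a = b := by
      intro a ha b hb
      exact hg a (List.mem_append_left _ ha) b (List.mem_append_left _ hb)
    rw [List.map_append, List.map_singleton, PySem.Set.ofList_append_singleton,
        PySem.Set.ofList_append_singleton, ih hg']
    by_cases hx : x ∈ PySem.Set.ofList ys
    · have hx' : g x ∈ (PySem.Set.ofList ys).map g := List.mem_map_of_mem hx
      rw [PySem.Set.add_of_mem hx', PySem.Set.add_of_mem hx]
    · have hx' : g x ∉ (PySem.Set.ofList ys).map g := by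
        intro hmem
        rcases List.mem_map.mp hmem with ⟨y, hy, hgy⟩
        have hy' : y ∈ ys := (PySem.Set.mem_ofList _ _).mp hy
        have : y = x := hg y (List.mem_append_left _ hy')
          x (List.mem_append_right _ (List.mem_singleton_self x)) hgy
        exact hx (this ▸ hy)
      rw [PySem.Set.add_of_not_mem hx', PySem.Set.add_of_not_mem hx, List.map_append,
          List.map_singleton]

theorem pv_counter_map_values {α β : Type} [BEq α] [LawfulBEq α] [BEq β] [LawfulBEq β] (g : α → β)
    (xs : List α) (hg : ∀ x ∈ xs, ∀ y ∈ xs, g x = g y → x = y) :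
    (PySem.Dict.counter (xs.map g)).values = (PySem.Dict.counter xs).values := by
  simp only [PySem.Dict.values, PySem.Dict.items_counter]
  rw [pv_ofList_map_injOn g xs hg]
  rw [List.map_map, List.map_map, List.map_map]
  refine List.map_congr_left ?_
  intro k hk
  have hk' : k ∈ xs := (PySem.Set.mem_ofList _ _).mp hk
  simp only [Function.comp_apply]
  rw [pv_count_map_injOn g xs hg k hk']
theorem pv_row_code (n : ℕ) (r : List Int) :
    (PySem.List.pyRange 1 (n : Int) 1).foldl (fun a j => 2 * a + pvBit r j) 0 = pvEnc (pvKey n r) := by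
  simp only [pvEnc, pvKey, List.foldl_map]
  refine PySem.List.foldl_congr_mem _ _ _ _ ?_
  intro a j hj
  by_cases h : PySem.List.pyGetD r j 0 ≠ PySem.List.pyGetD r 0 0
  · simp [pvBit, h, Ne.symm h]
  · simp only [ne_eq, not_not] at h
    simp [pvBit, h]

-- B's inner loop over the rows counts the occurrences of r's flip-pattern among all rows
theorem pv_inner_count (matrix : List (List Int)) (n : ℕ) (r : List Int) :
    matrix.foldl (fun c s =>
      if (PySem.List.pyRange 1 (n : Int) 1).all (fun j =>
           decide (PySem.List.pyGetD r j 0 ≠ PySem.List.pyGetD r 0 0) ==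
           decide (PySem.List.pyGetD s j 0 ≠ PySem.List.pyGetD s 0 0))
      then c + 1 else c) (0 : Int)
    = (((matrix.map (pvKey n)).count (pvKey n r) : ℕ) : Int) := by
  rw [PySem.List.foldl_if_add_one, zero_add]
  congr 1
  rw [List.count_eq_countP, List.countP_map]
  refine List.countP_congr ?_
  intro s _
  simp only [Function.comp_apply, beq_iff_eq, List.all_eq_true, beq_iff_eq, pvKey,
    List.map_eq_map_iff]
  constructor
  · intro h j hj; exact (h j hj).symm
  · intro h j hj; exact (h j hj).symm

-- the running max starting from 0 of two lists with the same members and nonneg entries agree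
theorem pv_foldl_max_zero_congr (l l' : List Int)
    (hm : ∀ x, x ∈ l ↔ x ∈ l') (_h0 : ∀ x ∈ l, 0 ≤ x) :
    l.foldl max 0 = l'.foldl max 0 := by
  have hub := (PySem.List.le_foldl_max l 0).2
  have hub' := (PySem.List.le_foldl_max l' 0).2
  have hz := (PySem.List.le_foldl_max l 0).1
  have hz' := (PySem.List.le_foldl_max l' 0).1
  rcases PySem.List.foldl_max_mem l 0 with h | h
  · rcases PySem.List.foldl_max_mem l' 0 with h' | h'
    · rw [h, h']
    · have h1 : l'.foldl max 0 ∈ l := (hm _).mpr h'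
      have h2 : l'.foldl max 0 ≤ l.foldl max 0 := hub _ h1
      have h3 : 0 ≤ l'.foldl max 0 := hz'
      omega
  · have h1 : l.foldl max 0 ∈ l' := (hm _).mp h
    have h2 : l.foldl max 0 ≤ l'.foldl max 0 := hub' _ h1
    rcases PySem.List.foldl_max_mem l' 0 with h' | h'
    · have h3 : 0 ≤ l.foldl max 0 := hz
      omega
    · have h4 : l'.foldl max 0 ∈ l := (hm _).mpr h'
      have h5 : l'.foldl max 0 ≤ l.foldl max 0 := hub _ h4
      omega

-- ===== VERDICT (by name: the statement is the Claim_ definition above) =====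
theorem solution_733_3_spec : Claim_equal_solution_733_3 := by
  intro matrix _ hpre
  unfold Spec_solution_733_3
  simp only [solution_733_3, solution_733_3_alt]
  set n := ((PySem.List.pyGet? matrix 0).getD []).length with hn
  -- A's score array is the row-wise packed codes
  have h0 : List.replicate matrix.length (0 : Int) = matrix.map (fun _ => (0 : Int)) := by
    simp [List.map_const']
  rw [h0, pv_outer_spec matrix (PySem.List.pyRange 1 (n : Int) 1) (fun _ => 0)]
  have hrow : matrix.map (fun r => (PySem.List.pyRange 1 (n : Int) 1).foldl
      (fun a j => 2 * a + pvBit r j) ((fun _ => (0:Int)) r))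
      = (matrix.map (pvKey n)).map pvEnc := by
    rw [List.map_map]
    exact List.map_congr_left (fun r _ => pv_row_code n r)
  rw [hrow]
  -- A's hand-rolled frequency dict is Counter
  have hfreq : (fun (d : PySem.Dict Int Int) x => d.insert x (1 + d.getD x 0))
      = (fun d x => d.insert x (d.getD x 0 + 1)) := by
    funext d x; rw [Int.add_comm]
  rw [hfreq, PySem.Dict.foldl_insert_getD_add_one_eq_counter]
  -- pvEnc is injective on the equal-length keys, so the Counters of codes and of keys agree
  set ks := matrix.map (pvKey n) with hks
  have hinj : ∀ x ∈ ks, ∀ y ∈ ks, pvEnc x = pvEnc y → x = y := by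
    intro x hx y hy he
    rcases List.mem_map.mp hx with ⟨r, _, hr⟩
    rcases List.mem_map.mp hy with ⟨r', _, hr'⟩
    have hlen : x.length = y.length := by
      rw [← hr, ← hr']; simp [pvKey]
    exact pvEnc_inj x y hlen he
  rw [pv_counter_map_values pvEnc ks hinj]
  -- Counter's values are the per-distinct-key counts
  have hv : (PySem.Dict.counter ks).values
      = (PySem.Set.ofList ks).map (fun k => ((ks.count k : ℕ) : Int)) := by
    simp [PySem.Dict.values, PySem.Dict.items_counter, List.map_map, Function.comp_def]
  rw [hv]
  -- the distinct-key count list is nonempty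
  have hmne : matrix ≠ [] := hpre.1
  obtain ⟨r0, rest, hm⟩ := List.exists_cons_of_ne_nil hmne
  have hk0 : pvKey n r0 ∈ PySem.Set.ofList ks :=
    (PySem.Set.mem_ofList _ _).mpr (by rw [hks, hm]; exact List.mem_map_of_mem (List.mem_cons_self))
  have hne : (PySem.Set.ofList ks).map (fun k => ((ks.count k : ℕ) : Int)) ≠ [] := by
    intro h
    rw [List.map_eq_nil_iff] at h
    rw [h] at hk0
    exact (List.not_mem_nil) hk0
  obtain ⟨y, ys, hy⟩ := List.exists_cons_of_ne_nil hne
  -- A = foldl max over the distinct counts, which (counts being ≥ 0) is a foldl max from 0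
  rw [hy, PySem.List.max?_id_cons, Option.getD_some]
  have hy0 : (0 : Int) ≤ y := by
    have : y ∈ (PySem.Set.ofList ks).map (fun k => ((ks.count k : ℕ) : Int)) := by
      rw [hy]; exact List.mem_cons_self
    rcases List.mem_map.mp this with ⟨k, _, hk⟩
    rw [← hk]; positivity
  have hA : ys.foldl max y = ((y :: ys).foldl max 0) := by
    simp [List.foldl_cons, max_eq_right hy0]
  rw [hA, ← hy]
  -- B = foldl max from 0 over the per-row counts
  have hB : matrix.foldl (fun best r =>
      let c := matrix.foldl (fun c s =>
        if (PySem.List.pyRange 1 (n : Int) 1).all (fun j =>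
             decide (PySem.List.pyGetD r j 0 ≠ PySem.List.pyGetD r 0 0) ==
             decide (PySem.List.pyGetD s j 0 ≠ PySem.List.pyGetD s 0 0))
        then c + 1 else c) (0 : Int)
      if c > best then c else best) 0
      = (ks.map (fun k => ((ks.count k : ℕ) : Int))).foldl max 0 := by
    rw [hks, List.foldl_map, List.foldl_map]
    refine PySem.List.foldl_congr_mem _ _ _ _ ?_
    intro best r _
    rw [pv_inner_count matrix n r, ← hks]
    by_cases h : (((ks.count (pvKey n r) : ℕ) : Int)) > best
    · simp only [if_pos h, max_eq_right h.le]
    · simp only [if_neg h]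
      rw [max_eq_left (not_lt.mp h)]
  rw [hB]
  -- same members, nonneg entries: the two running maxes agree
  refine (pv_foldl_max_zero_congr _ _ ?_ ?_).symm
  · intro x
    constructor
    · intro hx
      rcases List.mem_map.mp hx with ⟨k, hk, hkx⟩
      exact List.mem_map.mpr ⟨k, (PySem.Set.mem_ofList ks k).mpr hk, hkx⟩
    · intro hx
      rcases List.mem_map.mp hx with ⟨k, hk, hkx⟩
      exact List.mem_map.mpr ⟨k, (PySem.Set.mem_ofList ks k).mp hk, hkx⟩
  · intro x hx
    rcases List.mem_map.mp hx with ⟨k, _, hk⟩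
    rw [← hk]; positivity
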